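-- pv_equiv track=rewrite | github.com/lirmag/All-works | ege_dec_4var/22.py | f
-- ===== SOURCE A (Python) =====
-- def f(x):
--     a = 0
--     b = 0
--     while x > 0:
--         a += 1
--         if (b < (x % 8)):
--             b = x % 8
--         x //= 8
--     return a,b
-- ===== SOURCE B (Python) =====
-- def f(x):
--     if x <= 0:
--         return (0, 0)
--     s = oct(x)[2:]
--     return (len(s), max(int(c) for c in s))
-- ===== Notes on version B (the rewrite author's own statement) =====
-- stated objective: idiomatic
-- what changed: B builds the full octal digit string via oct() and aggregates length and maximum over it, instead of A's divide-and-remainder peeling loop with running count and running max.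
import Mathlib
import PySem

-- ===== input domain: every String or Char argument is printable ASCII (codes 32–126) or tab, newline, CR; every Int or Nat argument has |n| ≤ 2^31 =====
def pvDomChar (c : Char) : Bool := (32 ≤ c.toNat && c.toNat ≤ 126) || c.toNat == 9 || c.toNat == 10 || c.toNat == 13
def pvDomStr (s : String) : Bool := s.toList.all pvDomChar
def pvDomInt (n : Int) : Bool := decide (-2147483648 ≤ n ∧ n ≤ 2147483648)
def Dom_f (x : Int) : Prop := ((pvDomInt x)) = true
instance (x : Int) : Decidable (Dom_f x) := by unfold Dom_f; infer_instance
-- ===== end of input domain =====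

-- B builds the whole octal digit list first (via oct()) and aggregates len/max over it,
-- instead of A's digit-peeling loop with running count and running max; same cost.


-- ===== PORT A =====
-- the while loop of A: state (x, a, b)
def fGo (x a b : Int) : Int × Int :=
  if h : 0 < x then
    fGo (PySem.Int.floordiv x 8) (a + 1)
      (if b < PySem.Int.mod x 8 then PySem.Int.mod x 8 else b)
  else (a, b)
termination_by x.toNat
decreasing_by
  rw [PySem.Int.floordiv_eq_ediv_of_pos (by norm_num)]
  omega

def f (x : Int) : Int × Int := fGo x 0 0

-- ===== PORT B =====
-- the octal digit list of n (most significant first), i.e. oct(n)[2:] digit by digit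
def octDigits (n : Nat) : List Int :=
  if n < 8 then [(n : Int)] else octDigits (n / 8) ++ [((n % 8 : Nat) : Int)]

def f_alt (x : Int) : Int × Int :=
  if x ≤ 0 then (0, 0)
  else
    let s := octDigits x.toNat
    ((s.length : Int), (PySem.List.max? s (fun y => y)).getD 0)

-- ===== PRECONDITION & SPEC =====
def Spec_f (x : Int) (out : Int × Int) : Prop := out = f_alt x
instance (x : Int) (out : Int × Int) : Decidable (Spec_f x out) := by unfold Spec_f; infer_instance

-- ===== CLAIM (what is proved, stated in full; the proofs are below) =====
def Claim_equal_f : Prop := ∀ (x : Int), Dom_f x → Spec_f x (f x)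

-- ===== LEMMAS AND PROOFS =====

theorem foldl_max_comm (l : List Int) (b d : Int) :
    l.foldl max (max b d) = max (l.foldl max b) d := by
  induction l generalizing b with
  | nil => simp
  | cons h t ih =>
      simp only [List.foldl_cons]
      rw [max_right_comm, ih]

theorem octDigits_nonneg (n : Nat) : ∀ d ∈ octDigits n, 0 ≤ d := by
  induction n using Nat.strong_induction_on with
  | _ n ih =>
      rw [octDigits]
      split
      · simp
      · intro d hd
        rcases List.mem_append.mp hd with h | h
        · exact ih (n / 8) (by omega) d h
        · simp at h; omega

theorem octDigits_ne_nil (n : Nat) : octDigits n ≠ [] := by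
  rw [octDigits]; split <;> simp

-- loop invariant: fGo on positive x returns the digit count and the running max over all digits
theorem fGo_eq (k : Nat) : ∀ (x a b : Int), 0 < x → x.toNat ≤ k →
    fGo x a b = (a + ((octDigits x.toNat).length : Int),
                 (octDigits x.toNat).foldl max b) := by
  induction k with
  | zero => intro x a b hx hk; omega
  | succ k ih =>
      intro x a b hx hk
      rw [fGo]
      simp only [dif_pos hx]
      have hmod : PySem.Int.mod x 8 = x % 8 := PySem.Int.mod_eq_emod_of_pos (by norm_num)
      have hdiv : PySem.Int.floordiv x 8 = x / 8 := PySem.Int.floordiv_eq_ediv_of_pos (by norm_num)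
      have hifmax : (if b < PySem.Int.mod x 8 then PySem.Int.mod x 8 else b) = max b (x % 8) := by
        rw [hmod]; rcases le_or_gt (x % 8) b with h | h
        · rw [if_neg (by omega), max_eq_left h]
        · rw [if_pos (by omega), max_eq_right (le_of_lt h)]
      by_cases hsmall : x < 8
      · -- last digit: x // 8 = 0, loop ends
        have hdiv0 : x / 8 = 0 := by omega
        rw [hifmax, hdiv, hdiv0, fGo]
        simp only [dif_neg (by omega : ¬ (0:Int) < 0)]
        rw [octDigits, if_pos (by omega : x.toNat < 8)]
        have : x % 8 = x := by omega
        simp [this, hx.le]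
      · have hpos : 0 < x / 8 := by omega
        rw [hifmax, hdiv, ih (x / 8) (a + 1) (max b (x % 8)) hpos (by omega)]
        have hsplit : octDigits x.toNat =
            octDigits (x.toNat / 8) ++ [((x.toNat % 8 : Nat) : Int)] := by
          rw [octDigits, if_neg (by omega)]
        have h1 : (x / 8).toNat = x.toNat / 8 := by omega
        have h2 : ((x.toNat % 8 : Nat) : Int) = x % 8 := by omega
        rw [hsplit, h1, h2, List.length_append, List.foldl_append]
        simp only [List.foldl_cons, List.foldl_nil, List.length_cons, List.length_nil,
          Prod.mk.injEq]
        exact ⟨by push_cast; ring, foldl_max_comm _ _ _⟩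

-- ===== VERDICT (by name: the statement is the Claim_ definition above) =====
theorem f_spec : Claim_equal_f := by
  intro x _
  unfold Spec_f f f_alt
  by_cases hx : x ≤ 0
  · rw [if_pos hx, fGo]
    simp [dif_neg (by omega : ¬ (0:Int) < x)]
  · rw [if_neg hx]
    rw [not_le] at hx
    rw [fGo_eq x.toNat x 0 0 hx le_rfl]
    obtain ⟨d, t, ht⟩ : ∃ d t, octDigits x.toNat = d :: t := by
      cases h : octDigits x.toNat with
      | nil => exact absurd h (octDigits_ne_nil _)
      | cons d t => exact ⟨d, t, rfl⟩
    have hd0 : 0 ≤ d := octDigits_nonneg x.toNat d (ht ▸ List.mem_cons_self ..)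
    simp only [ht, PySem.List.max?_id_cons, Option.getD_some, List.foldl_cons,
      max_eq_right hd0, zero_add]
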